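-- pv_equiv track=rewrite | github.com/LeYangNwpu/CodeCraft | string/KMP_pattern_match.py | longest_same_str
-- ===== SOURCE A (Python) =====
-- def longest_same_str(astr):
--     num = len(astr)
--     len_max = 0
--     # i indicates the length of sub-string, i = {1, ..., num-1}
--     for i in range(1, num):
--         fore_str = astr[:i]
--         back_str = astr[-i:]
--         if fore_str == back_str:
--             len_max = i
--     match = len_max + 1
--     return match
-- ===== SOURCE B (Python) =====
-- def longest_same_str(astr):
--     # Incrementally maintain the set of ALL border lengths (prefix == suffix) of the
--     # prefix scanned so far, in decreasing order; a border of w+c is k+1 for a border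
--     # k of w with astr[k] == c (plus the empty border 0).  No slice comparisons at all.
--     borders = []
--     for i, c in enumerate(astr):
--         borders = [k + 1 for k in borders if astr[k] == c]
--         borders.append(0)
--     return (borders[0] if borders else 0) + 1
-- ===== Notes on version B (the rewrite author's own statement) =====
-- stated objective: alternative
-- what changed: B never compares prefix/suffix slices: it scans the string once, incrementally maintaining the list of ALL border lengths of the prefix seen so far (a border of w+c is exactly k+1 for a border k of w with astr[k]==c), and returns the largest final border + 1.
import Mathlib
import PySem

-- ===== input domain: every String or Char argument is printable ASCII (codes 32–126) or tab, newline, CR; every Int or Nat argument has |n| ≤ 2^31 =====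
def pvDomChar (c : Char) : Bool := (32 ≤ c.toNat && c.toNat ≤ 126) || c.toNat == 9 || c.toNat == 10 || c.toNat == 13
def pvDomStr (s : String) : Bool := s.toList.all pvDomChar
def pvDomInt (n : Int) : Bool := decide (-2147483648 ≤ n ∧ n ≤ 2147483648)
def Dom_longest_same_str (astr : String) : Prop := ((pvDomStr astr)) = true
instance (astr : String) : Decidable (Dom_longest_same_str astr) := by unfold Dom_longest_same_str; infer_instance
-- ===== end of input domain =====

-- B replaces A's brute-force comparison of every prefix with the same-length suffix by an
-- incremental algorithm maintaining the set of ALL border lengths of the scanned prefix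
-- (extended one character at a time by single indexed character comparisons, no slices);
-- objective: alternative.

-- ===== PORT A =====
def longest_same_str (astr : String) : Int :=
  let num : Int := PySem.Str.len astr
  let len_max : Int :=
    (PySem.List.pyRange 1 num 1).foldl
      (fun len_max i =>
        let fore_str := PySem.Str.slice astr none (some i)
        let back_str := PySem.Str.slice astr (some (-i)) none
        if fore_str = back_str then i else len_max) 0
  len_max + 1

-- ===== PORT B =====
-- B's loop state: the decreasing list of all border lengths of the prefix scanned so far.
def longest_same_str_alt (astr : String) : Int :=
  let borders : List Int :=
    (PySem.List.enumerate astr.toList 0).foldl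
      (fun borders ic =>
        ((borders.filter (fun k => PySem.Str.pyGet? astr k == some ic.2)).map (fun k => k + 1)) ++ [0])
      []
  borders.headD 0 + 1

-- ===== PRECONDITION & SPEC =====
def Spec_longest_same_str (astr : String) (out : Int) : Prop := out = longest_same_str_alt astr
instance (astr : String) (out : Int) : Decidable (Spec_longest_same_str astr out) := by unfold Spec_longest_same_str; infer_instance

-- ===== CLAIM (what is proved, stated in full; the proofs are below) =====
def Claim_equal_longest_same_str : Prop := ∀ (astr : String), Dom_longest_same_str astr → Spec_longest_same_str astr (longest_same_str astr)

-- ===== LEMMAS AND PROOFS =====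

-- all border lengths of the length-i prefix of s, in decreasing order
def natBorders (s : List Char) (i : Nat) : List Nat :=
  ((List.range i).reverse).filter (fun k => decide (s.take k = (s.take i).drop (i - k)))

lemma border_zero (s : List Char) (i : Nat) :
    s.take 0 = (s.take i).drop i := by
  simp [List.drop_eq_nil_of_le]

lemma border_ext (s : List Char) (i k : Nat) (hk : k < i) (hi : i < s.length) :
    (s.take (k+1) = (s.take (i+1)).drop (i - k)) ↔
      (s.take k = (s.take i).drop (i - k) ∧ s[k]'(by omega) = s[i]'hi) := by
  have hk' : k < s.length := by omega
  have htk : s.take (k+1) = s.take k ++ [s[k]'hk'] := by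
    rw [List.take_add_one]; simp [List.getElem?_eq_getElem hk']
  have hti : s.take (i+1) = s.take i ++ [s[i]'hi] := by
    rw [List.take_add_one]; simp [List.getElem?_eq_getElem hi]
  have hlen : (s.take i).length = i := by simp; omega
  have hdr : (s.take (i+1)).drop (i - k) = (s.take i).drop (i - k) ++ [s[i]'hi] := by
    rw [hti, List.drop_append_of_le_length (by omega)]
  rw [htk, hdr]
  constructor
  · intro h
    have := List.append_inj' h (by simp)
    exact ⟨this.1, by simpa using this.2⟩
  · rintro ⟨h1, h2⟩
    rw [h1, h2]

lemma natBorders_succ (s : List Char) (i : Nat) (c : Char) (hi : i < s.length)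
    (hc : s[i]? = some c) :
    natBorders s (i+1)
      = ((natBorders s i).filter (fun k => s[k]? == some c)).map (fun k => k + 1) ++ [0] := by
  have hci : c = s[i]'hi := by
    rw [List.getElem?_eq_getElem hi] at hc; exact (Option.some_inj.mp hc).symm
  unfold natBorders
  rw [List.range_succ_eq_map, List.reverse_cons', List.concat_eq_append, List.filter_append,
    ← List.map_reverse, List.filter_map, List.filter_filter]
  have hcgr : ∀ k ∈ (List.range i).reverse,
      ((fun k => decide (List.take k s = List.drop (i + 1 - k) (List.take (i + 1) s))) ∘ Nat.succ) k
        = (fun a => s[a]? == some c && decide (List.take a s = List.drop (i - a) (List.take i s))) k := by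
    intro k hkmem
    have hk : k < i := List.mem_range.mp (List.mem_reverse.mp hkmem)
    have hks : k < s.length := by omega
    simp only [Function.comp, Nat.succ_eq_add_one]
    have h1 : i + 1 - (k + 1) = i - k := by omega
    rw [h1, decide_eq_decide.mpr (border_ext s i k hk hi)]
    simp [List.getElem?_eq_getElem hks, hci, Bool.decide_and, Bool.and_comm, Bool.beq_eq_decide_eq]
    infer_instance
  rw [List.filter_congr hcgr]
  simp only [List.filter_cons, List.filter_nil, Nat.sub_zero,
    decide_eq_true (border_zero s (i+1)), if_true]

lemma alt_inv (astr : String) (i : Nat) (hi : i ≤ astr.toList.length) :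
    (PySem.List.enumerate (astr.toList.take i) 0).foldl
      (fun borders ic =>
        ((borders.filter (fun k => PySem.Str.pyGet? astr k == some ic.2)).map (fun k => k + 1)) ++ [0])
      []
      = (natBorders astr.toList i).map (fun k : Nat => (k : Int)) := by
  induction i with
  | zero => simp [natBorders, PySem.List.enumerate_nil]
  | succ i ih =>
      have hi : i < astr.toList.length := by omega
      have htake : astr.toList.take (i+1) = astr.toList.take i ++ [astr.toList[i]'hi] := by
        rw [List.take_add_one]; simp [List.getElem?_eq_getElem hi]
      rw [htake, PySem.List.enumerate_append, List.foldl_append, ih (by omega)]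
      rw [PySem.List.enumerate_cons, PySem.List.enumerate_nil, List.foldl_cons, List.foldl_nil]
      rw [natBorders_succ astr.toList i (astr.toList[i]'hi) hi (List.getElem?_eq_getElem hi)]
      simp only [List.map_append, List.map_map, List.map_cons, List.map_nil]
      rw [List.filter_map]
      have hpred : ((fun k => PySem.Str.pyGet? astr k == some (astr.toList[i]'hi)) ∘ (fun k : Nat => (k : Int)))
          = (fun k : Nat => astr.toList[k]? == some (astr.toList[i]'hi)) := by
        funext k; simp
      rw [hpred]
      rw [List.map_map]
      have hfun : ((fun k : Int => k + 1) ∘ fun k : Nat => (k : Int))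
          = ((fun k : Nat => (k : Int)) ∘ fun k : Nat => k + 1) := by
        funext k; simp
      rw [hfun]
      simp

lemma cond_bridge (astr : String) (m : Nat) (hm : 0 < m) :
    (PySem.Str.slice astr none (some (m : Int)) = PySem.Str.slice astr (some (-(m : Int))) none)
      ↔ (astr.toList.take m = astr.toList.drop (astr.toList.length - m)) := by
  constructor
  · intro h
    have := congrArg String.toList h
    simpa [PySem.Str.toList_slice, PySem.Chars.slice_eq_listSlice, PySem.List.slice_to_natCast,
      PySem.List.slice_from_neg_natCast _ _ hm] using this
  · intro h
    apply String.toList_injective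
    simpa [PySem.Str.toList_slice, PySem.Chars.slice_eq_listSlice, PySem.List.slice_to_natCast,
      PySem.List.slice_from_neg_natCast _ _ hm] using h

lemma a_side (astr : String) (m : Nat) (hm : m ≤ astr.toList.length) :
    (PySem.List.pyRange 1 (m : Int) 1).foldl
      (fun len_max i =>
        if PySem.Str.slice astr none (some i) = PySem.Str.slice astr (some (-i)) none then i
        else len_max) 0
      = ((((List.range m).reverse).filter
            (fun k => decide (astr.toList.take k = astr.toList.drop (astr.toList.length - k)))).headD 0 : Nat) := by
  induction m with
  | zero => rw [PySem.List.pyRange_one_eq_nil (by simp)]; simp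
  | succ m ih =>
      have hc : ((m + 1 : Nat) : Int) = (m : Int) + 1 := by push_cast; ring
      rw [hc]
      rcases Nat.eq_zero_or_pos m with h0 | hpos
      · subst h0
        rw [PySem.List.pyRange_one_eq_nil (by simp)]
        simp [List.drop_eq_nil_of_le]
      · rw [PySem.List.pyRange_one_succ_right (by omega), List.foldl_append, List.foldl_cons,
          List.foldl_nil, List.range_succ, List.reverse_append, List.reverse_singleton,
          List.singleton_append, List.filter_cons]
        have hbr := cond_bridge astr m hpos
        by_cases hcb : astr.toList.take m = astr.toList.drop (astr.toList.length - m)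
        · rw [if_pos (hbr.mpr hcb), if_pos (by simpa using hcb), List.headD_cons]
        · rw [if_neg (fun h => hcb (hbr.mp h)), if_neg (by simpa using hcb), ih (by omega)]

-- ===== VERDICT (by name: the statement is the Claim_ definition above) =====
theorem longest_same_str_spec : Claim_equal_longest_same_str := by
  intro astr _
  unfold Spec_longest_same_str longest_same_str longest_same_str_alt
  simp only [PySem.Str.len_eq]
  have hB := alt_inv astr astr.toList.length le_rfl
  rw [List.take_length] at hB
  rw [hB, a_side astr astr.toList.length le_rfl]
  unfold natBorders
  rw [List.take_length]
  cases h : (List.range astr.toList.length).reverse.filter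
      (fun k => decide (astr.toList.take k = astr.toList.drop (astr.toList.length - k))) with
  | nil => simp
  | cons a l => simp
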